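-- pv_equiv track=rewrite | github.com/gitmengzh/leetcode | leetcode1.py | solution_coins2
-- ===== SOURCE A (Python) =====
-- def solution_coins2(coins):
--     total = 0
--     for i in range(len(coins)):
--         if coins[i] % 2 == 0:
--             total = total + coins[i]//2
--         else:
--             total = total + coins[i]//2+1
--     return total
-- ===== SOURCE B (Python) =====
-- def solution_coins2(coins):
--     # Divide-and-conquer: recursively split the index range in half and add
--     # ceil(c/2) = -(-c // 2) for each single element (no parity branch).
--     def go(lo, hi):
--         if hi - lo == 0:
--             return 0
--         if hi - lo == 1:
--             c = coins[lo]
--             return -(-c // 2)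
--         mid = (lo + hi) // 2
--         return go(lo, mid) + go(mid, hi)
--     return go(0, len(coins))
-- ===== Notes on version B (the rewrite author's own statement) =====
-- stated objective: alternative
-- what changed: Replaces A's indexed loop with a parity branch by a divide-and-conquer recursion that splits the index range in half and computes each element's ceiling half via the negated floor division -(-c//2), with no running accumulator and no parity test.
import Mathlib
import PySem

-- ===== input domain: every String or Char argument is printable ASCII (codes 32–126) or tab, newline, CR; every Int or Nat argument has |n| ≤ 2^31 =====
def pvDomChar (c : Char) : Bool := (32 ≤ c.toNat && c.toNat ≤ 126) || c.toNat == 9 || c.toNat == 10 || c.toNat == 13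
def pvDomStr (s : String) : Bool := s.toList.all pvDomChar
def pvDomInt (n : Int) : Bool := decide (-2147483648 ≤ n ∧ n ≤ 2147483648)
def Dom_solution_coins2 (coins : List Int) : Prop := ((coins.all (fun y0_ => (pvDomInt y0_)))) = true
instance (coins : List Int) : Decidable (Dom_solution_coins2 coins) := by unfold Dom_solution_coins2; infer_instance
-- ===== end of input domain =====

-- B replaces A's indexed accumulator loop (parity branch per element) by a divide-and-conquer
-- recursion over index ranges using ceil(c/2) = -(-c//2); alternative decomposition, same cost.

-- ===== PORT A =====
-- A: loop over indices, branch on parity, running total.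
def solution_coins2 (coins : List Int) : Int :=
  (PySem.List.pyRange 0 (PySem.List.len coins) 1).foldl
    (fun total i =>
      let c := PySem.List.pyGetD coins i 0
      if PySem.Int.mod c 2 = 0 then total + PySem.Int.floordiv c 2
      else total + PySem.Int.floordiv c 2 + 1)
    0

-- ===== PORT B =====
-- B's ceiling half: -(-c // 2), exactly as in Source B.
def pvCeilHalf (c : Int) : Int := -(PySem.Int.floordiv (-c) 2)

-- B's recursive splitter go(lo, hi); indices are always in range on the calls made from the
-- top level, so coins[lo] is ported as getD (exact there).
def pvGo (coins : List Int) (lo hi : Nat) : Int :=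
  if hi - lo = 0 then 0
  else if hi - lo = 1 then pvCeilHalf (coins.getD lo 0)
  else
    let mid := (lo + hi) / 2
    pvGo coins lo mid + pvGo coins mid hi
termination_by hi - lo
decreasing_by all_goals omega

def solution_coins2_alt (coins : List Int) : Int := pvGo coins 0 coins.length

-- ===== PRECONDITION & SPEC =====
def Spec_solution_coins2 (coins : List Int) (out : Int) : Prop := out = solution_coins2_alt coins
instance (coins : List Int) (out : Int) : Decidable (Spec_solution_coins2 coins out) := by unfold Spec_solution_coins2; infer_instance

-- ===== CLAIM (what is proved, stated in full; the proofs are below) =====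
def Claim_equal_solution_coins2 : Prop := ∀ (coins : List Int), Dom_solution_coins2 coins → Spec_solution_coins2 coins (solution_coins2 coins)

-- ===== LEMMAS AND PROOFS =====

-- go over [lo, hi) sums pvCeilHalf of the (getD-)elements with those indices.
theorem pvGo_eq (coins : List Int) : ∀ (n lo hi : Nat), hi - lo = n →
    pvGo coins lo hi
      = ((List.range' lo (hi - lo)).map (fun i => pvCeilHalf (coins.getD i 0))).sum := by
  intro n
  induction n using Nat.strong_induction_on with
  | _ n ih =>
    intro lo hi hn
    rw [pvGo]
    by_cases h0 : hi - lo = 0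
    · simp [h0]
    · by_cases h1 : hi - lo = 1
      · simp [h1]
      · have hmidlt : (lo + hi) / 2 - lo < n := by omega
        have hhilt : hi - (lo + hi) / 2 < n := by omega
        simp only [h0, h1, if_false]
        rw [ih _ hmidlt _ _ rfl, ih _ hhilt _ _ rfl]
        have hsplit : List.range' lo (hi - lo)
            = List.range' lo ((lo + hi) / 2 - lo) ++ List.range' ((lo + hi) / 2) (hi - (lo + hi) / 2) := by
          have := @List.range'_append lo ((lo + hi) / 2 - lo) (hi - (lo + hi) / 2) 1
          simp only [one_mul] at this
          rw [show lo + ((lo + hi) / 2 - lo) = (lo + hi) / 2 by omega] at this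
          rw [show (lo + hi) / 2 - lo + (hi - (lo + hi) / 2) = hi - lo by omega] at this
          exact this.symm
        rw [hsplit, List.map_append, List.sum_append]

-- summing pvCeilHalf over indices of range (len) is summing it over the elements
theorem range_getD_sum (coins : List Int) :
    ((List.range coins.length).map (fun i => pvCeilHalf (coins.getD i 0))).sum
      = (coins.map pvCeilHalf).sum := by
  induction coins with
  | nil => simp
  | cons c cs ih =>
    rw [List.length_cons, List.range_succ_eq_map]
    simp only [List.map_cons, List.map_map, List.sum_cons]
    simp only [Function.comp_def, List.getD_cons_succ, List.getD_cons_zero]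
    rw [ih]

-- A's loop body over the elements accumulates the same element-wise ceiling halves
theorem foldl_coins_eq (coins : List Int) : ∀ (t : Int),
    coins.foldl
      (fun total c =>
        if PySem.Int.mod c 2 = 0 then total + PySem.Int.floordiv c 2
        else total + PySem.Int.floordiv c 2 + 1) t
    = t + (coins.map pvCeilHalf).sum := by
  induction coins with
  | nil => intro t; simp
  | cons c cs ih =>
    intro t
    simp only [List.foldl_cons, List.map_cons, List.sum_cons, ih]
    unfold pvCeilHalf
    rw [PySem.Int.mod_eq_emod_of_pos (by norm_num),
        PySem.Int.floordiv_eq_ediv_of_pos (by norm_num),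
        PySem.Int.floordiv_eq_ediv_of_pos (by norm_num)]
    by_cases h : c % 2 = 0 <;> simp [h] <;> omega

-- ===== VERDICT (by name: the statement is the Claim_ definition above) =====
theorem solution_coins2_spec : Claim_equal_solution_coins2 := by
  intro coins _
  unfold Spec_solution_coins2 solution_coins2 solution_coins2_alt
  rw [PySem.List.len_eq, PySem.List.foldl_pyRange_zero_pyGetD' coins 0
    (fun total c => if PySem.Int.mod c 2 = 0 then total + PySem.Int.floordiv c 2
      else total + PySem.Int.floordiv c 2 + 1) 0]
  rw [foldl_coins_eq, pvGo_eq coins coins.length 0 coins.length (by omega)]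
  simp only [Nat.sub_zero, ← List.range_eq_range']
  rw [range_getD_sum]
  simp
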